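-- pv_equiv track=rewrite | github.com/101v/JobEx | jobex/strana/simple_match.py | find_matches
-- ===== SOURCE A (Python) =====
-- def find_matches(tokens, candidates):
--     matched_candidates = []
--     for candidate in candidates:
--         candidate_parts = candidate.split()
--         if len(candidate_parts) > 1:
--             for i, x in enumerate(tokens):
--                 if candidate_parts[0] == tokens[i] and i < len(tokens)-1 and candidate_parts[1] == tokens[i + 1]:
--                     matched_candidates.append(candidate)
--         else:
--             if candidate in tokens:
--                 matched_candidates.append(candidate)
--
--     return matched_candidates
-- ===== SOURCE B (Python) =====
-- def find_matches(tokens, candidates):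
--     # Precompute once: set of tokens and counts of adjacent token pairs,
--     # then each candidate is a constant-time lookup.
--     token_set = set(tokens)
--     pair_count = {}
--     for pair in zip(tokens, tokens[1:]):
--         pair_count[pair] = pair_count.get(pair, 0) + 1
--     matched = []
--     for candidate in candidates:
--         parts = candidate.split()
--         if len(parts) > 1:
--             matched += [candidate] * pair_count.get((parts[0], parts[1]), 0)
--         elif candidate in token_set:
--             matched.append(candidate)
--     return matched
-- ===== Notes on version B (the rewrite author's own statement) =====
-- stated objective: faster
-- what changed: B precomputes the set of tokens and a dictionary counting adjacent token pairs once, then each candidate becomes a constant-time set/dict lookup (appending the candidate pair-count times), replacing A's per-candidate scan over all tokens.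
import Mathlib
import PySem

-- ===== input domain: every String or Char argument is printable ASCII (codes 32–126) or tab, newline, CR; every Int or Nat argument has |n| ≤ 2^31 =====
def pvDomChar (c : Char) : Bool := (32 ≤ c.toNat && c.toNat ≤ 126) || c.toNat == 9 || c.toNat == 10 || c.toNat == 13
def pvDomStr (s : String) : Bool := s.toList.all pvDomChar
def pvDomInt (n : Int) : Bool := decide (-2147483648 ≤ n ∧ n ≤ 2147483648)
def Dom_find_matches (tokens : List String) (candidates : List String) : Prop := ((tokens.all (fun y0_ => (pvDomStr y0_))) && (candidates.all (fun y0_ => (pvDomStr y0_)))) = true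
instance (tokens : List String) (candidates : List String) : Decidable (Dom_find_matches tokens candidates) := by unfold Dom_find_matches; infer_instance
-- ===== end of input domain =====

-- B precomputes the token set and a counter of adjacent token pairs, replacing A's
-- per-candidate scan of the token list by a single lookup (objective: faster).
-- ===== PORT A =====
def find_matches (tokens : List String) (candidates : List String) : List String :=
  candidates.foldl (fun matched candidate =>
    let parts := PySem.Str.split₀ candidate
    if parts.length > 1 then
      (PySem.List.enumerate tokens).foldl (fun m p =>
        if PySem.List.pyGetD parts 0 "" == PySem.List.pyGetD tokens p.1 ""
            && decide (p.1 < (tokens.length : Int) - 1)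
            && PySem.List.pyGetD parts 1 "" == PySem.List.pyGetD tokens (p.1 + 1) ""
        then m ++ [candidate] else m) matched
    else
      if tokens.contains candidate then matched ++ [candidate] else matched) []

-- ===== PORT B =====
def find_matches_alt (tokens : List String) (candidates : List String) : List String :=
  let tokenSet := PySem.Set.ofList tokens
  let pairCount := (tokens.zip tokens.tail).foldl
      (fun d p => d.insert p (d.getD p (0 : Int) + 1)) PySem.Dict.empty
  candidates.foldl (fun matched candidate =>
    let parts := PySem.Str.split₀ candidate
    if parts.length > 1 then
      matched ++ List.replicate
        (pairCount.getD (PySem.List.pyGetD parts 0 "", PySem.List.pyGetD parts 1 "") 0).toNat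
        candidate
    else
      if PySem.Set.contains tokenSet candidate then matched ++ [candidate] else matched) []

-- ===== PRECONDITION & SPEC =====
def Spec_find_matches (tokens : List String) (candidates : List String) (out : List String) : Prop := out = find_matches_alt tokens candidates
instance (tokens : List String) (candidates : List String) (out : List String) : Decidable (Spec_find_matches tokens candidates out) := by unfold Spec_find_matches; infer_instance

-- ===== CLAIM (what is proved, stated in full; the proofs are below) =====
def Claim_equal_find_matches : Prop := ∀ (tokens : List String) (candidates : List String), Dom_find_matches tokens candidates → Spec_find_matches tokens candidates (find_matches tokens candidates)

-- ===== LEMMAS AND PROOFS =====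

-- The number of indices i at which A's inner scan fires (tokens[i] = p0, i < len-1,
-- tokens[i+1] = p1) equals the multiplicity of (p0, p1) among adjacent pairs of tokens.
theorem pv_count_aux (p0 p1 : String) : ∀ (ts pre : List String),
    (PySem.List.enumerate ts (pre.length : Int)).countP
      (fun p => p0 == PySem.List.pyGetD (pre ++ ts) p.1 ""
             && decide (p.1 < (((pre ++ ts).length : Int)) - 1)
             && p1 == PySem.List.pyGetD (pre ++ ts) (p.1 + 1) "")
    = (ts.zip ts.tail).count (p0, p1) := by
  intro ts
  induction ts with
  | nil => intro pre; simp [PySem.List.enumerate]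
  | cons t ts' ih =>
      intro pre
      have h0 : PySem.List.pyGetD (pre ++ t :: ts') ((pre.length : Int)) "" = t := by
        rw [PySem.List.pyGetD_natCast, List.getD, List.getElem?_append_right (le_refl _)]
        simp
      have ihx := ih (pre ++ [t])
      simp only [List.append_assoc, List.singleton_append, List.length_append,
        List.length_cons, List.length_nil] at ihx
      cases ts' with
      | nil =>
          simp [PySem.List.enumerate_cons]
      | cons u ts'' =>
          have h1 : PySem.List.pyGetD (pre ++ t :: u :: ts'') ((pre.length : Int) + 1) "" = u := by
            have hc : ((pre.length : Int) + 1) = (((pre.length + 1 : Nat)) : Int) := by push_cast; ring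
            rw [hc, PySem.List.pyGetD_natCast, List.getD,
                show pre ++ t :: u :: ts'' = (pre ++ [t]) ++ u :: ts'' by simp,
                List.getElem?_append_right (by simp)]
            simp
          have hg' : ((pre.length : Int) < (pre.length : Int) + ((ts''.length : Int) + 1 + 1) - 1) := by omega
          rcases eq_or_ne p0 t with e0 | e0 <;> rcases eq_or_ne p1 u with e1 | e1
          · subst e0; subst e1
            simp [PySem.List.enumerate_cons, List.countP_cons, h0, h1, hg'] at ihx ⊢ <;> omega
          · subst e0
            simp [PySem.List.enumerate_cons, List.countP_cons, h0, h1, hg', e1, Ne.symm e1,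
              Prod.ext_iff] at ihx ⊢ <;> omega
          · subst e1
            simp [PySem.List.enumerate_cons, List.countP_cons, h0, h1, hg', e0, Ne.symm e0,
              Prod.ext_iff] at ihx ⊢ <;> omega
          · simp [PySem.List.enumerate_cons, List.countP_cons, h0, h1, hg', e0, Ne.symm e0,
              e1, Ne.symm e1, Prod.ext_iff] at ihx ⊢ <;> omega

-- Candidate by candidate, A's step function agrees with B's.
theorem find_matches_eq_alt : ∀ (tokens candidates : List String),
    find_matches tokens candidates = find_matches_alt tokens candidates := by
  intro tokens candidates
  unfold find_matches find_matches_alt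
  apply PySem.List.foldl_congr_mem
  intro matched candidate _
  by_cases hlen : (PySem.Str.split₀ candidate).length > 1
  · rw [if_pos hlen, if_pos hlen,
      PySem.List.foldl_append_if (f := fun _ : Int × String => candidate),
      PySem.Dict.getD_foldl_insert_add_one]
    have hcnt := pv_count_aux
      (PySem.List.pyGetD (PySem.Str.split₀ candidate) 0 "")
      (PySem.List.pyGetD (PySem.Str.split₀ candidate) 1 "") tokens []
    simp only [List.nil_append, List.length_nil, Nat.cast_zero] at hcnt
    simp [List.map_const', ← List.countP_eq_length_filter]
    exact hcnt
  · rw [if_neg hlen, if_neg hlen]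
    by_cases hm : candidate ∈ tokens <;>
      simp [hm, PySem.Set.contains_eq_listContains, PySem.Set.mem_ofList,
        List.contains_iff_mem]

-- ===== VERDICT (by name: the statement is the Claim_ definition above) =====
theorem find_matches_spec : Claim_equal_find_matches := by
  intro tokens candidates _
  unfold Spec_find_matches
  exact find_matches_eq_alt tokens candidates
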